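-- pv_equiv track=rewrite | github.com/jonathantsang/CompetitiveProgramming | binarysearchio/contest5/2.py | solve
-- ===== SOURCE A (Python) =====
-- import collections
-- import heapq
--
-- def solve(s, k):
--     # Write your code here
--     v = collections.Counter(s)
--     heap = []
--     for i in v:
--         heap.append((v[i], i))
--     heapq.heapify(heap)
--     ans = 0
--     while len(heap) > k:
--         ans += heapq.heappop(heap)[0]
--     return ans
-- ===== SOURCE B (Python) =====
-- import collections
--
--
-- def solve(s, k):
--     counts = sorted(collections.Counter(s).values())
--     return sum(counts[: max(len(counts) - k, 0)])
-- ===== Notes on version B (the rewrite author's own statement) =====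
-- stated objective: simpler
-- what changed: A builds a heap of (count,char) pairs and repeatedly heappops while the heap is longer than k, summing the popped counts; B sorts the counter's values once and returns the sum of the first len-k of them via a slice, with no loop of its own.
import Mathlib
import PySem

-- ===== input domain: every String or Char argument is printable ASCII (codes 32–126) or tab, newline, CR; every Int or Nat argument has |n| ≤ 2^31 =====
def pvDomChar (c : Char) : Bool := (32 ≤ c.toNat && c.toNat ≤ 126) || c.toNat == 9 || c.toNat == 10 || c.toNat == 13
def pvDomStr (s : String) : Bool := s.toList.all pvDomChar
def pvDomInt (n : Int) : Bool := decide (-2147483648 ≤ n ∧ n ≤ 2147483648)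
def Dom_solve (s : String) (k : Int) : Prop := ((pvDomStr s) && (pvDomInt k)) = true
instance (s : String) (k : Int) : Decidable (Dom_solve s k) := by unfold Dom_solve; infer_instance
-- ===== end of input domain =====

-- B replaces A's heapify-and-pop loop by sorting the counter's values once and summing
-- the prefix of all but the k largest (objective: simpler/idiomatic; return value only).

-- ===== PORT A =====
-- the folding step of PySem.List.min2? at key functions fst/snd (no library lemmas exist
-- for min2?; pvMin2_mem below is cited by popLoop's termination proof)
def pvStep (acc : Option (Int × Char)) (x : Int × Char) : Option (Int × Char) :=
  match acc with
  | none => some x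
  | some m =>
    if (decide (x.1 < m.1) || !decide (m.1 < x.1) && decide (x.2 < m.2)) = true
    then some x else some m

lemma pvMin2_eq_foldl (xs : List (Int × Char)) :
    PySem.List.min2? xs (fun p => p.1) (fun p => p.2) = xs.foldl pvStep none := by
  unfold PySem.List.min2?
  apply List.foldl_ext
  intro acc x _
  cases acc <;> rfl

lemma pvStepFold (xs : List (Int × Char)) : ∀ (a : Int × Char),
    ∃ m, xs.foldl pvStep (some a) = some m ∧ (m = a ∨ m ∈ xs) ∧ m.1 ≤ a.1 ∧
      ∀ y ∈ xs, m.1 ≤ y.1 := by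
  induction xs with
  | nil => intro a; exact ⟨a, rfl, Or.inl rfl, le_refl _, by simp⟩
  | cons x t ih =>
    intro a
    rw [List.foldl_cons]
    by_cases hc : (decide (x.1 < a.1) || !decide (a.1 < x.1) && decide (x.2 < a.2)) = true
    · have hstep : pvStep (some a) x = some x := by simp only [pvStep, hc, if_true]
      rw [hstep]
      obtain ⟨m, hm, hmem, hle, hall⟩ := ih x
      have hx : x.1 ≤ a.1 := by
        rcases Bool.or_eq_true_iff.mp hc with h | h
        · exact le_of_lt (by simpa using h)
        · have := (Bool.and_eq_true_iff.mp h).1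
          simp only [Bool.not_eq_true', decide_eq_false_iff_not, not_lt] at this
          exact this
      refine ⟨m, hm, ?_, le_trans hle hx, ?_⟩
      · rcases hmem with h | h
        · exact Or.inr (by simp [h])
        · exact Or.inr (List.mem_cons_of_mem _ h)
      · intro y hy
        rcases List.mem_cons.mp hy with rfl | hy
        · exact hle
        · exact hall y hy
    · have hstep : pvStep (some a) x = some a := by simp only [pvStep, if_neg hc]
      rw [hstep]
      obtain ⟨m, hm, hmem, hle, hall⟩ := ih a
      have hax : a.1 ≤ x.1 := by
        have h1 : ¬ x.1 < a.1 := by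
          intro hlt
          exact hc (Bool.or_eq_true_iff.mpr (Or.inl (by simpa using hlt)))
        omega
      refine ⟨m, hm, ?_, hle, ?_⟩
      · rcases hmem with h | h
        · exact Or.inl h
        · exact Or.inr (List.mem_cons_of_mem _ h)
      · intro y hy
        rcases List.mem_cons.mp hy with rfl | hy
        · exact le_trans hle hax
        · exact hall y hy

-- membership of the min2? result (cited by popLoop's decreasing_by)
lemma pvMin2_mem (xs : List (Int × Char)) (m : Int × Char)
    (hm : PySem.List.min2? xs (fun p => p.1) (fun p => p.2) = some m) : m ∈ xs := by
  rw [pvMin2_eq_foldl] at hm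
  cases xs with
  | nil => simp [List.foldl_nil] at hm
  | cons x t =>
    rw [List.foldl_cons] at hm
    have hstep : pvStep none x = some x := rfl
    rw [hstep] at hm
    obtain ⟨m', hm', hmem, _, _⟩ := pvStepFold t x
    rw [hm'] at hm
    cases hm
    rcases hmem with rfl | h
    · exact List.mem_cons_self
    · exact List.mem_cons_of_mem _ h

-- A's while-loop: heapq.heappop returns the (count, char)-lexicographic minimum and removes
-- it; ported as removal of the first minimum (exact at the level of the popped values).
-- When the heap is empty and len > k Python raises IndexError: the `none` branch (reached
-- only for k < 0, excluded by Pre_solve) returns ans.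
def popLoop (heap : List (Int × Char)) (k : Int) (ans : Int) : Int :=
  if (heap.length : Int) > k then
    match hm : PySem.List.min2? heap (fun p => p.1) (fun p => p.2) with
    | none => ans
    | some m => popLoop (heap.erase m) k (ans + m.1)
  else ans
termination_by heap.length
decreasing_by
  have hmem := pvMin2_mem _ _ hm
  have h1 := List.length_erase_of_mem hmem
  have h2 := List.length_pos_of_mem hmem
  omega

def solve (s : String) (k : Int) : Int :=
  let v := PySem.Dict.counter s.toList
  let heap := v.items.map (fun p => (p.2, p.1))
  popLoop heap k 0

-- ===== PORT B =====
def solve_alt (s : String) (k : Int) : Int :=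
  let counts := PySem.List.sorted (PySem.Dict.counter s.toList).values (fun x => x) false
  (PySem.List.slice counts none (some (max ((counts.length : Int) - k) 0))).sum

-- ===== PRECONDITION & SPEC =====
-- A raises IndexError (heappop of an empty heap) whenever k < 0; those inputs are excluded.
def Pre_solve (s : String) (k : Int) : Prop := 0 ≤ k
instance (s : String) (k : Int) : Decidable (Pre_solve s k) := by unfold Pre_solve; infer_instance
def pvWitness_solve : String × Int := ("ab", 1)

def Spec_solve (s : String) (k : Int) (out : Int) : Prop := out = solve_alt s k
instance (s : String) (k : Int) (out : Int) : Decidable (Spec_solve s k out) := by unfold Spec_solve; infer_instance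

-- ===== CLAIM (what is proved, stated in full; the proofs are below) =====
def Claim_equal_solve : Prop := ∀ (s : String) (k : Int), Dom_solve s k → Pre_solve s k → Spec_solve s k (solve s k)

-- ===== LEMMAS AND PROOFS =====

-- minimality of the min2? result on the first component
lemma pvMin2_isMin (xs : List (Int × Char)) (m : Int × Char)
    (hm : PySem.List.min2? xs (fun p => p.1) (fun p => p.2) = some m) :
    ∀ y ∈ xs, m.1 ≤ y.1 := by
  rw [pvMin2_eq_foldl] at hm
  cases xs with
  | nil => simp [List.foldl_nil] at hm
  | cons x t =>
    rw [List.foldl_cons] at hm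
    have hstep : pvStep none x = some x := rfl
    rw [hstep] at hm
    obtain ⟨m', hm', _, hle, hall⟩ := pvStepFold t x
    rw [hm'] at hm
    cases hm
    intro y hy
    rcases List.mem_cons.mp hy with rfl | hy
    · exact hle
    · exact hall y hy

lemma pvMin2_some (xs : List (Int × Char)) (hne : xs ≠ []) :
    ∃ m, PySem.List.min2? xs (fun p => p.1) (fun p => p.2) = some m := by
  cases xs with
  | nil => exact absurd rfl hne
  | cons x t =>
    obtain ⟨m', hm', _, _, _⟩ := pvStepFold t x
    exact ⟨m', by rw [pvMin2_eq_foldl, List.foldl_cons]; exact hm'⟩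

-- pulling the minimum to the front of the sorted list
lemma pvSorted_min_cons (cs : List Int) (m : Int) (cs' : List Int)
    (hperm : cs.Perm (m :: cs')) (hmin : ∀ y ∈ cs, m ≤ y) :
    PySem.List.sorted cs (fun x => x) false = m :: PySem.List.sorted cs' (fun x => x) false := by
  apply PySem.List.eq_of_perm_of_pairwise_le_of_injective (fun x : Int => x) (fun _ _ h => h)
  · exact ((PySem.List.sorted_perm cs _ _).trans hperm).trans
      (List.Perm.cons m (PySem.List.sorted_perm cs' _ _).symm)
  · exact PySem.List.sorted_pairwise cs _
  · refine List.pairwise_cons.mpr ⟨?_, PySem.List.sorted_pairwise cs' _⟩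
    intro y hy
    have hy' : y ∈ cs := hperm.symm.mem_iff.mp
      (List.mem_cons_of_mem m ((PySem.List.mem_sorted cs' _ _ y).mp hy))
    exact hmin y hy'

-- the pop loop sums the (length − k) smallest first components
lemma popLoop_eq (k : Int) (hk : 0 ≤ k) :
    ∀ (n : Nat) (heap : List (Int × Char)) (ans : Int), heap.length = n →
      popLoop heap k ans
        = ans + ((PySem.List.sorted (heap.map (·.1)) (fun x => x) false).take
                   (heap.length - k.toNat)).sum := by
  intro n
  induction n using Nat.strong_induction_on with
  | _ n ih =>
    intro heap ans hn
    by_cases h : (heap.length : Int) > k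
    · have hne : heap ≠ [] := by
        intro h0; rw [h0] at h; simp at h; omega
      rw [popLoop, if_pos h]
      split
      · next heq =>
        obtain ⟨m, hm⟩ := pvMin2_some heap hne
        rw [heq] at hm; cases hm
      · next m heq =>
        have hmem := pvMin2_mem heap m heq
        have hmin := pvMin2_isMin heap m heq
        have hlen : (heap.erase m).length = heap.length - 1 :=
          List.length_erase_of_mem hmem
        have hpos := List.length_pos_of_mem hmem
        have hlt : (heap.erase m).length < n := by omega
        rw [ih _ hlt (heap.erase m) (ans + m.1) rfl]
        have hperm : (heap.map (·.1)).Perm (m.1 :: (heap.erase m).map (·.1)) := by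
          simpa using (List.perm_cons_erase hmem).map (·.1)
        have hmin' : ∀ y ∈ heap.map (·.1), m.1 ≤ y := by
          intro y hy
          obtain ⟨p, hp, rfl⟩ := List.mem_map.mp hy
          exact hmin p hp
        rw [pvSorted_min_cons _ _ _ hperm hmin']
        have htake : heap.length - k.toNat = ((heap.erase m).length - k.toNat) + 1 := by
          have h2 : k.toNat < heap.length := by omega
          omega
        rw [htake, List.take_succ_cons, List.sum_cons]
        ring
    · rw [popLoop, if_neg h]
      have h0 : heap.length - k.toNat = 0 := by omega
      simp [h0]

-- ===== VERDICT (by name: the statement is the Claim_ definition above) =====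
theorem solve_spec : Claim_equal_solve := by
  intro s k _ hkpre
  have hk : 0 ≤ k := hkpre
  show solve s k = solve_alt s k
  simp only [solve, solve_alt]
  set v := PySem.Dict.counter s.toList with hv
  have hmap : (v.items.map (fun p => (p.2, p.1))).map (·.1) = v.values := by
    simp [PySem.Dict.values, List.map_map]
  rw [popLoop_eq k hk _ (v.items.map (fun p => (p.2, p.1))) 0 rfl, hmap]
  have hlen : (v.items.map (fun p => (p.2, p.1))).length = v.values.length := by
    simp [PySem.Dict.values]
  have hslen : (PySem.List.sorted v.values (fun x => x) false).length = v.values.length :=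
    PySem.List.length_sorted _ _ _
  rw [PySem.List.slice_to _ (le_max_right _ _)]
  have heq : (max ((((PySem.List.sorted v.values (fun x => x) false).length : Int)) - k) 0).toNat
      = (v.items.map (fun p => (p.2, p.1))).length - k.toNat := by
    rw [hslen, hlen]; omega
  rw [heq, zero_add]
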